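/- GENERATED by c/gen_decode.py: decode facts of the image, one per distinct instruction byte string. -/
import UserX.DecodeImage

#decode_all ProgX.Base.Dec
  "0f8783000000"  -- ja 103bad
  "44886500"  -- mov BYTE PTR [rbp+0x0],r12b
  "4883c418"  -- add rsp,0x18
  "4889d6"  -- mov rsi,rdx
  "488d4701"  -- lea rax,[rdi+0x1]
  "4989cd"  -- mov r13,rcx
  "4c89e1"  -- mov rcx,r12
  "660f2eca"  -- ucomisd xmm1,xmm2
  "72e9"  -- jb 100d68
  "7513"  -- jne 1004bc
  "7e07"  -- jle 100c27
  "8d8301fcffff"  -- lea eax,[rbx-0x3ff]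
  "e802beffff"  -- call 100059
  "e897faffff"  -- call 101d00
  "e8ef0d0000"  -- call 104300
  "ebe5"  -- jmp 103b73
  "f20f580597d70300"  -- addsd xmm0,QWORD PTR [rip+0x3d797]
  "f20f59c0"  -- mulsd xmm0,xmm0
  "f20f5e15cbda0300"  -- divsd xmm2,QWORD PTR [rip+0x3dacb]
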